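-- pv_equiv track=rewrite | github.com/MarshalZhang/2017A2CS | Ch24/Recurrsion.py | count8
-- ===== SOURCE A (Python) =====
-- def  count8 (x):
--     if x==8:
--         return 1
--     elif x<10:
--         return 0
--     else:
--         if x%10 ==8 and (x//10)%10==8:
--             return 2+ count8(x//10)
--         else:
--             return count8(x//10)    #not working correctly
-- ===== SOURCE B (Python) =====
-- def count8(x):
--     total = 0
--     while x >= 10:
--         if x % 10 == 8 and (x // 10) % 10 == 8:
--             total += 2
--         x //= 10
--     if x == 8:
--         total += 1
--     return total
-- ===== Notes on version B (the rewrite author's own statement) =====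
-- stated objective: alternative
-- what changed: Replaces the digit-peeling recursion with an iterative while-loop over an explicit total accumulator (lone-8 base case handled after the loop).
import Mathlib
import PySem

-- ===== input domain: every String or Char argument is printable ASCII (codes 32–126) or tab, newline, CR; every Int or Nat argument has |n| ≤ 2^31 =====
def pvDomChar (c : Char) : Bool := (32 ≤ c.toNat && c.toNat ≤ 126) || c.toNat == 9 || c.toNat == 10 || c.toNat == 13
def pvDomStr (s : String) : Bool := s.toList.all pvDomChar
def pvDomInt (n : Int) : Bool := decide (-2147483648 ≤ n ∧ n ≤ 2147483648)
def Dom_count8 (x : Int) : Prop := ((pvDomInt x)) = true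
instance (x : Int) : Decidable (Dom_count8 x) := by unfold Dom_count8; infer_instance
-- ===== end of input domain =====

-- B replaces A's digit-peeling recursion with an iterative accumulator loop (same cost; objective: alternative decomposition).


-- ===== PORT A =====
def count8 (x : Int) : Int :=
  if x = 8 then 1
  else if x < 10 then 0
  else
    if PySem.Int.mod x 10 = 8 ∧ PySem.Int.mod (PySem.Int.floordiv x 10) 10 = 8 then
      2 + count8 (PySem.Int.floordiv x 10)
    else
      count8 (PySem.Int.floordiv x 10)
termination_by x.toNat
decreasing_by
  all_goals
    rw [PySem.Int.floordiv_eq_ediv_of_pos (by omega)]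
    omega

-- ===== PORT B =====
-- the while-loop of Source B, state (x, total)
def count8AltGo (x : Int) (total : Int) : Int :=
  if 10 ≤ x then
    count8AltGo (PySem.Int.floordiv x 10)
      (if PySem.Int.mod x 10 = 8 ∧ PySem.Int.mod (PySem.Int.floordiv x 10) 10 = 8 then total + 2 else total)
  else if x = 8 then total + 1 else total
termination_by x.toNat
decreasing_by
  rw [PySem.Int.floordiv_eq_ediv_of_pos (by omega)]
  omega

def count8_alt (x : Int) : Int := count8AltGo x 0

-- ===== PRECONDITION & SPEC =====
def Spec_count8 (x : Int) (out : Int) : Prop := out = count8_alt x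
instance (x : Int) (out : Int) : Decidable (Spec_count8 x out) := by unfold Spec_count8; infer_instance

-- ===== CLAIM (what is proved, stated in full; the proofs are below) =====
def Claim_equal_count8 : Prop := ∀ (x : Int), Dom_count8 x → Spec_count8 x (count8 x)

-- ===== LEMMAS AND PROOFS =====

-- loop invariant: the accumulator passes through additively
theorem count8AltGo_eq (x total : Int) : count8AltGo x total = total + count8 x := by
  induction x, total using count8AltGo.induct with
  | case1 x total h ih =>
    rw [count8AltGo, count8]
    simp only [dite_eq_ite] at ih
    rw [if_pos h, if_neg (by omega : ¬ x = 8), if_neg (by omega : ¬ x < 10), ih]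
    split_ifs with hb <;> ring
  | case2 total h =>
    rw [count8AltGo, count8]
    rw [if_neg h, if_pos rfl, if_pos rfl]
  | case3 x total h h8 =>
    rw [count8AltGo, count8]
    rw [if_neg h, if_neg h8, if_neg h8, if_pos (by omega : x < 10), Int.add_zero]

-- ===== VERDICT (by name: the statement is the Claim_ definition above) =====
theorem count8_spec : Claim_equal_count8 := by
  intro x _
  unfold Spec_count8 count8_alt
  rw [count8AltGo_eq]
  ring
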